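-- pv_equiv track=rewrite | github.com/DerKevinRiehl/transposon_classifier_rfsb | RFSB_Evaluator.py | getConfusionMatrix_Perspective3
-- ===== SOURCE A (Python) =====
-- def getSuperiorNode(c):
--     if(not "/" in c):
--         return ""
--     else:
--         parts = c.split("/")
--         newC = ""
--         for p in range(0, len(parts)-1):
--             newC = newC + parts[p] + "/"
--         return newC[:-1]
--
-- def getSuperiorNodes(classes, levels):
--     sNodes = list()
--     for i in range(0,len(classes)):
--         if(not "/" in classes[i]):
--             sNodes.append(list())
--         else:
--             l = list()
--             sup = getSuperiorNode(classes[i])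
--             while(sup!=""):
--                 l.append(sup)
--                 sup = getSuperiorNode(sup)
--             sNodes.append(l)
--     return sNodes
--
-- def getSuperiorNodesIncl(classes, levels):
--     sNodes = getSuperiorNodes(classes, levels)
--     for i in range(0,len(classes)):
--         sNodes[i].insert(0,classes[i])
--     return sNodes
--
-- def getConfusionMatrix_Perspective3(Mtrue, Mpred, Lbltrue, Lblpred, classes, levels, nNodes):
--     TP = 0 # counter variables
--     FP = 0
--     TN = 0
--     FN = 0
--     sNodesIncl = getSuperiorNodesIncl(classes, levels)
--     for i in range(0, len(Mtrue)): # main loop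
--         pathTrue = sNodesIncl[classes.index(Lbltrue[i])]
--         pathPred = sNodesIncl[classes.index(Lblpred[i])]
--         if(len(pathTrue)<len(pathPred)):
--             pathPred = pathPred[len(pathPred)-len(pathTrue):] # making  longer prediction Path to same length as pathTrue
--
--         pathCommon = intersection(pathTrue, pathPred)
--         childrenDeepest = cut(getChildren(getDeepestNode(pathCommon, classes, levels),classes),union(pathTrue,pathPred))
--         neighborsOfCommonPath = list()
--         for cl in pathCommon:
--             neighborsOfCommonPath += nNodes[classes.index(cl)]
--         TP += power(pathCommon)
--         FP += power(pathPred) - power(pathCommon)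
--         TN += power(neighborsOfCommonPath) + power(childrenDeepest)
--         FN += power(pathTrue) - power(pathCommon)
--     return [TP, FP, TN, FN, len(Mtrue)]
--
-- def union(A,B):
--     return list(set(A+B))
--
-- def intersection(A,B):
--     return list(set(A) & set(B))
--
-- def power(A):
--     return len(A)
--
-- def getDeepestNode(A, classes, levels):
--     lMax = -1
--     node = ""
--     for x in A:
--         if(levels[classes.index(x)]>lMax):
--             lMax = levels[classes.index(x)]
--             node = x
--     return node
--
-- def getChildren(node, classes):
--     cList = list()
--     for c in classes:
--         if(c.startswith(node+"/")):
--             cList.append(c)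
--     return cList
--
-- def cut(A,B):
--     return list(set(A).difference(set(B)))
-- ===== SOURCE B (Python) =====
-- def _parent(c):
--     return c[:c.rfind("/")] if "/" in c else ""
--
-- def _ancestors(label):
--     chain = [label]
--     c = _parent(label)
--     while c != "":
--         chain.append(c)
--         c = _parent(c)
--     return chain
--
-- def getConfusionMatrix_Perspective3(Mtrue, Mpred, Lbltrue, Lblpred, classes, levels, nNodes):
--     n = len(Mtrue)
--     idx = {}
--     for j, c in enumerate(classes):
--         idx.setdefault(c, j)
--     TP = FP = TN = FN = 0
--     for t, p in zip(Lbltrue[:n], Lblpred[:n]):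
--         chainT = _ancestors(t)
--         chainP = _ancestors(p)
--         m = min(len(chainT), len(chainP))
--         k = 0
--         while k < m and chainT[len(chainT) - 1 - k] == chainP[len(chainP) - 1 - k]:
--             k += 1
--         common = chainT[len(chainT) - k:]
--         TP += k
--         FP += m - k
--         FN += len(chainT) - k
--         deepest, lmax = "", -1
--         for c in common:
--             lv = levels[idx[c]]
--             if lv > lmax:
--                 deepest, lmax = c, lv
--         keep = set(chainT) | set(chainP[max(len(chainP) - len(chainT), 0):])
--         children = {c for c in classes if c.startswith(deepest + "/") and c not in keep}
--         TN += len(children) + sum(len(nNodes[idx[c]]) for c in common)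
--     return [TP, FP, TN, FN, n]
-- ===== Notes on version B (the rewrite author's own statement) =====
-- stated objective: alternative
-- what changed: B drops A's precomputed superior-node table, set-intersection and level-argmax-over-a-set machinery: per sample it reads the ancestor chains directly off the two label strings (rfind-based parent steps), gets TP/FP/FN by longest-common-suffix arithmetic, takes the common suffix itself as the common path, and replaces repeated classes.index scans with a first-occurrence index dict.
import Mathlib
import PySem

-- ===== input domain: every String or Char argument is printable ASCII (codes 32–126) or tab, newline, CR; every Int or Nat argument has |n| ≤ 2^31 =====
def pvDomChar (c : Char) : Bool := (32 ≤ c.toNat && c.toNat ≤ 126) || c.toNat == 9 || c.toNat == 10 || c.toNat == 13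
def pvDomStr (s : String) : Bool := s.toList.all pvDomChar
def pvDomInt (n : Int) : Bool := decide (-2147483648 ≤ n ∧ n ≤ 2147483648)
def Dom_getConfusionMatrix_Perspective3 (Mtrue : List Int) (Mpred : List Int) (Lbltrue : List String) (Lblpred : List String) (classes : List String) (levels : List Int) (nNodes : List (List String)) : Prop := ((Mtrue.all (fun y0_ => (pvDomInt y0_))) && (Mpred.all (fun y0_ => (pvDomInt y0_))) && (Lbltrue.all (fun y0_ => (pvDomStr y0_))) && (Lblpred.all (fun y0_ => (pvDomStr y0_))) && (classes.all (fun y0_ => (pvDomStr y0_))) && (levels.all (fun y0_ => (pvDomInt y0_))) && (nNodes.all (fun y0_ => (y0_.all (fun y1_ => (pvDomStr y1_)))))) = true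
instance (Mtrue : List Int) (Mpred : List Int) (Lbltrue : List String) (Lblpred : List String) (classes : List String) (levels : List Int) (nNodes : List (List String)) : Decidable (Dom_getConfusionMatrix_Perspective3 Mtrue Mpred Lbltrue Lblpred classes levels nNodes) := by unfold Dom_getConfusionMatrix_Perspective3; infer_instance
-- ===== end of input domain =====

-- B replaces A's precomputed ancestor table, set-intersection and level-argmax with per-sample
-- ancestor chains read off the label strings and longest-common-suffix arithmetic (objective: alternative).

-- Python '+' on strings (exact: concatenation of code points), used by both ports.
def sApp (a b : String) : String := String.ofList (a.toList ++ b.toList)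

-- ===== PORT A =====
def gSupNode (c : String) : String :=
  if !(PySem.Str.isIn "/" c) then ""
  else
    let parts := (PySem.Str.split? c "/").getD []
    let newC := (PySem.List.pyRange 0 (PySem.List.len parts - 1) 1).foldl
      (fun newC p => sApp (sApp newC (PySem.List.pyGetD parts p "")) "/") ""
    PySem.Str.slice newC none (some (-1))

-- the 'while(sup!="")' loop of getSuperiorNodes; fuel only makes it total (one parent step per slash)
def aSupLoop : Nat → String → List String
  | 0, _ => []
  | fuel+1, c =>
    let sup := gSupNode c
    if sup = "" then [] else sup :: aSupLoop fuel sup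

def gSupNodesPort (classes : List String) : List (List String) :=
  (PySem.List.pyRange 0 (PySem.List.len classes) 1).foldl
    (fun sNodes i =>
      let c := PySem.List.pyGetD classes i ""
      if !(PySem.Str.isIn "/" c) then sNodes ++ [[]]
      else sNodes ++ [aSupLoop (c.toList.length + 1) c]) []

def gSupNodesInclPort (classes : List String) : List (List String) :=
  (PySem.List.pyRange 0 (PySem.List.len classes) 1).foldl
    (fun sNodes i => PySem.List.pySetD sNodes i
      (PySem.List.insert (PySem.List.pyGetD sNodes i []) 0 (PySem.List.pyGetD classes i "")))
    (gSupNodesPort classes)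

def getDeepestNodePort (A : List String) (classes : List String) (levels : List Int) : Int × String :=
  A.foldl (fun st x =>
    if PySem.List.pyGetD levels (((PySem.List.index? classes x).getD 0 : Nat) : Int) 0 > st.1
    then (PySem.List.pyGetD levels (((PySem.List.index? classes x).getD 0 : Nat) : Int) 0, x)
    else st) (-1, "")

def getChildrenPort (node : String) (classes : List String) : List String :=
  classes.foldl (fun cList c => if PySem.Str.startswith c (sApp node "/") then cList ++ [c] else cList) []

def getConfusionMatrix_Perspective3 (Mtrue : List Int) (Mpred : List Int) (Lbltrue : List String) (Lblpred : List String) (classes : List String) (levels : List Int) (nNodes : List (List String)) : List Int :=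
  let sNodesIncl := gSupNodesInclPort classes
  let st := (PySem.List.pyRange 0 (PySem.List.len Mtrue) 1).foldl (fun st i =>
    let pathTrue := PySem.List.pyGetD sNodesIncl (((PySem.List.index? classes (PySem.List.pyGetD Lbltrue i "")).getD 0 : Nat) : Int) []
    let pathPred0 := PySem.List.pyGetD sNodesIncl (((PySem.List.index? classes (PySem.List.pyGetD Lblpred i "")).getD 0 : Nat) : Int) []
    let pathPred := if PySem.List.len pathTrue < PySem.List.len pathPred0
      then PySem.List.slice pathPred0 (some (PySem.List.len pathPred0 - PySem.List.len pathTrue)) none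
      else pathPred0
    let pathCommon : PySem.Set String := PySem.Set.inter (PySem.Set.ofList pathTrue) (PySem.Set.ofList pathPred)
    let node := (getDeepestNodePort pathCommon classes levels).2
    let childrenDeepest : PySem.Set String := PySem.Set.diff (PySem.Set.ofList (getChildrenPort node classes)) (PySem.Set.ofList (pathTrue ++ pathPred))
    let neighbors := pathCommon.foldl (fun acc cl => acc ++ PySem.List.pyGetD nNodes (((PySem.List.index? classes cl).getD 0 : Nat) : Int) []) ([] : List String)
    (st.1 + PySem.List.len pathCommon,
     st.2.1 + (PySem.List.len pathPred - PySem.List.len pathCommon),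
     st.2.2.1 + (PySem.List.len neighbors + PySem.List.len childrenDeepest),
     st.2.2.2 + (PySem.List.len pathTrue - PySem.List.len pathCommon)))
    ((0,0,0,0) : Int × Int × Int × Int)
  [st.1, st.2.1, st.2.2.1, st.2.2.2, PySem.List.len Mtrue]

-- ===== PORT B =====
def bParent (c : String) : String :=
  if PySem.Str.isIn "/" c then PySem.Str.slice c none (some (PySem.Str.rfind c "/")) else ""

-- the 'while c != ""' loop of _ancestors; fuel only makes it total (one parent step per slash)
def bAncTail : Nat → String → List String
  | 0, _ => []
  | fuel+1, c => let p := bParent c; if p = "" then [] else p :: bAncTail fuel p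

def bAncestors (label : String) : List String := label :: bAncTail (label.toList.length + 1) label

def bIdx (classes : List String) : PySem.Dict String Int :=
  (PySem.List.enumerate classes).foldl (fun d jc => PySem.Dict.setdefault d jc.2 jc.1) PySem.Dict.empty

-- the 'while k < m and …' loop; fuel only makes it total (at most m+1 tests)
def bKLoop : Nat → List String → List String → Int → Int
  | 0, _, _, k => k
  | fuel+1, a, b, k =>
    if k < min (PySem.List.len a) (PySem.List.len b) ∧
       PySem.List.pyGetD a (PySem.List.len a - 1 - k) "" = PySem.List.pyGetD b (PySem.List.len b - 1 - k) ""
    then bKLoop fuel a b (k+1) else k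

def getConfusionMatrix_Perspective3_alt (Mtrue : List Int) (Mpred : List Int) (Lbltrue : List String) (Lblpred : List String) (classes : List String) (levels : List Int) (nNodes : List (List String)) : List Int :=
  let n := PySem.List.len Mtrue
  let idx := bIdx classes
  let st := (List.zip (PySem.List.slice Lbltrue none (some n)) (PySem.List.slice Lblpred none (some n))).foldl
    (fun st tp =>
      let chainT := bAncestors tp.1
      let chainP := bAncestors tp.2
      let m := min (PySem.List.len chainT) (PySem.List.len chainP)
      let k := bKLoop (m.toNat + 1) chainT chainP 0
      let common := PySem.List.slice chainT (some (PySem.List.len chainT - k)) none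
      let dl := common.foldl (fun (st : String × Int) c =>
          let lv := PySem.List.pyGetD levels (PySem.Dict.getD idx c 0) 0
          if lv > st.2 then (c, lv) else st) ("", -1)
      let keep : PySem.Set String := PySem.Set.union (PySem.Set.ofList chainT)
        (PySem.Set.ofList (PySem.List.slice chainP (some (max (PySem.List.len chainP - PySem.List.len chainT) 0)) none))
      let children : PySem.Set String := PySem.Set.ofList (classes.filter (fun c => PySem.Str.startswith c (sApp dl.1 "/") && !(PySem.Set.contains keep c)))
      (st.1 + k,
       st.2.1 + (m - k),
       st.2.2.1 + (PySem.Set.len children + (common.map (fun c => PySem.List.len (PySem.List.pyGetD nNodes (PySem.Dict.getD idx c 0) []))).sum),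
       st.2.2.2 + (PySem.List.len chainT - k)))
    ((0,0,0,0) : Int × Int × Int × Int)
  [st.1, st.2.1, st.2.2.1, st.2.2.2, n]

-- ===== PRECONDITION & SPEC =====
-- the '/'-separated ancestor paths of a label (the label itself and every prefix ending just
-- before a '/'): a closed-form positional description of the hierarchy encoded in the input strings
def pvNodes (t : String) : List String :=
  (List.range (t.toList.length + 1)).filterMap (fun j =>
    if j = t.toList.length ∨ (0 < j ∧ t.toList[j]? = some '/') then some (String.ofList (t.toList.take j)) else none)

-- Pre_ excludes exactly (a) inputs where CPython A raises (labels shorter than Mtrue → IndexError,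
-- a sample label absent from classes → ValueError, a shared ancestor absent from classes → ValueError,
-- or its first index out of range of levels/nNodes → IndexError), and (b) the defensible corner where
-- two shared ancestors of a sample carry the same level: there A's answer depends on CPython's
-- set-iteration (hash) order and is not a specifiable value.
def Pre_getConfusionMatrix_Perspective3 (Mtrue : List Int) (Mpred : List Int) (Lbltrue : List String) (Lblpred : List String) (classes : List String) (levels : List Int) (nNodes : List (List String)) : Prop :=
  Mtrue.length ≤ Lbltrue.length ∧ Mtrue.length ≤ Lblpred.length ∧
  ∀ i < Mtrue.length,
    Lbltrue.getD i "" ∈ classes ∧ Lblpred.getD i "" ∈ classes ∧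
    (∀ x ∈ pvNodes (Lbltrue.getD i ""), x ∈ pvNodes (Lblpred.getD i "") →
       x ∈ classes ∧ classes.idxOf x < levels.length ∧ classes.idxOf x < nNodes.length) ∧
    (∀ x ∈ pvNodes (Lbltrue.getD i ""), ∀ y ∈ pvNodes (Lbltrue.getD i ""),
       x ∈ pvNodes (Lblpred.getD i "") → y ∈ pvNodes (Lblpred.getD i "") → x ≠ y →
       levels.getD (classes.idxOf x) 0 ≠ levels.getD (classes.idxOf y) 0)
instance (Mtrue : List Int) (Mpred : List Int) (Lbltrue : List String) (Lblpred : List String) (classes : List String) (levels : List Int) (nNodes : List (List String)) : Decidable (Pre_getConfusionMatrix_Perspective3 Mtrue Mpred Lbltrue Lblpred classes levels nNodes) := by unfold Pre_getConfusionMatrix_Perspective3; infer_instance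

def pvWitness_getConfusionMatrix_Perspective3 : List Int × List Int × List String × List String × List String × List Int × List (List String) :=
  ([0], [], ["a/b"], ["a"], ["a", "a/b"], [1, 2], [[], []])

def Spec_getConfusionMatrix_Perspective3 (Mtrue : List Int) (Mpred : List Int) (Lbltrue : List String) (Lblpred : List String) (classes : List String) (levels : List Int) (nNodes : List (List String)) (out : List Int) : Prop := out = getConfusionMatrix_Perspective3_alt Mtrue Mpred Lbltrue Lblpred classes levels nNodes
instance (Mtrue : List Int) (Mpred : List Int) (Lbltrue : List String) (Lblpred : List String) (classes : List String) (levels : List Int) (nNodes : List (List String)) (out : List Int) : Decidable (Spec_getConfusionMatrix_Perspective3 Mtrue Mpred Lbltrue Lblpred classes levels nNodes out) := by unfold Spec_getConfusionMatrix_Perspective3; infer_instance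

-- ===== CLAIM (what is proved, stated in full; the proofs are below) =====
def Claim_equal_getConfusionMatrix_Perspective3 : Prop := ∀ (Mtrue : List Int) (Mpred : List Int) (Lbltrue : List String) (Lblpred : List String) (classes : List String) (levels : List Int) (nNodes : List (List String)), Dom_getConfusionMatrix_Perspective3 Mtrue Mpred Lbltrue Lblpred classes levels nNodes → Pre_getConfusionMatrix_Perspective3 Mtrue Mpred Lbltrue Lblpred classes levels nNodes → Spec_getConfusionMatrix_Perspective3 Mtrue Mpred Lbltrue Lblpred classes levels nNodes (getConfusionMatrix_Perspective3 Mtrue Mpred Lbltrue Lblpred classes levels nNodes)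

-- ===== LEMMAS AND PROOFS =====

def pvParR : List Char → List Char
  | [] => []
  | c :: t => if '/' ∈ t then c :: pvParR t else []

theorem pvParR_prefix (l : List Char) : pvParR l <+: l := by
  induction l with
  | nil => simp [pvParR]
  | cons c t ih =>
    by_cases h : '/' ∈ t <;> simp [pvParR, h]
    exact ih

theorem pvParR_length_lt {l : List Char} (h : pvParR l ≠ []) : (pvParR l).length < l.length := by
  induction l with
  | nil => simp [pvParR] at h
  | cons c t ih =>
    by_cases hm : '/' ∈ t
    · simp only [pvParR, if_pos hm, List.length_cons]
      by_cases hn : pvParR t = []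
      · rw [hn]; simpa using List.length_pos_of_mem hm
      · simpa using ih hn
    · simp [pvParR, hm] at h

theorem pvParR_of_not_mem {l : List Char} (h : ¬ '/' ∈ l) : pvParR l = [] := by
  cases l with
  | nil => rfl
  | cons c t => simp only [List.mem_cons] at h; push_neg at h; simp [pvParR, h.2]

theorem getElem?_pvParR_length {l : List Char} (h : '/' ∈ l) :
    l[(pvParR l).length]? = some '/' := by
  induction l with
  | nil => simp at h
  | cons c t ih =>
    by_cases hm : '/' ∈ t
    · simpa [pvParR, hm] using ih hm
    · have hc : c = '/' := by rcases List.mem_cons.mp h with h1 | h2; exact h1.symm; exact absurd h2 hm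
      simp [pvParR, hm, hc]

theorem getElem?_slash_gt {l : List Char} {j : Nat} (hj : (pvParR l).length < j) :
    l[j]? ≠ some '/' := by
  induction l generalizing j with
  | nil => simp
  | cons c t ih =>
    by_cases hm : '/' ∈ t
    · simp only [pvParR, if_pos hm, List.length_cons] at hj
      cases j with
      | zero => omega
      | succ j' => simpa using ih (by omega)
    · cases j with
      | zero => simp [pvParR, hm] at hj
      | succ j' =>
        have : '/' ∉ t := hm
        simp only [List.getElem?_cons_succ]
        intro hc
        exact hm (List.mem_of_getElem? hc)

theorem singleton_prefix_iff (l : List Char) (n : Nat) :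
    ['/'].isPrefixOf (l.drop n) = true ↔ l[n]? = some '/' := by
  rw [List.isPrefixOf_iff_prefix, ← List.head?_drop]
  cases hd : (l.drop n) with
  | nil => simp
  | cons a t => simp [List.cons_prefix_cons, eq_comm]

theorem rfindGo_eq {l : List Char} (h : '/' ∈ l) :
    ∀ n, (pvParR l).length ≤ n → PySem.Chars.rfind.go l ['/'] n = ((pvParR l).length : Int) := by
  intro n
  induction n with
  | zero =>
    intro hn
    have h0 : (pvParR l).length = 0 := by omega
    rw [PySem.Chars.rfind.go]
    have : ['/'].isPrefixOf (l.drop 0) = true := by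
      rw [singleton_prefix_iff]
      have := getElem?_pvParR_length h
      rwa [h0] at this
    simp only [List.drop_zero] at this ⊢
    rw [if_pos (by simpa using this), h0]
    rfl
  | succ n ih =>
    intro hn
    rw [PySem.Chars.rfind.go]
    by_cases he : (pvParR l).length = n + 1
    · rw [if_pos (by rw [singleton_prefix_iff, ← he]; exact getElem?_pvParR_length h), he]
    · have hlt : (pvParR l).length ≤ n := by omega
      rw [if_neg (by rw [singleton_prefix_iff]; exact getElem?_slash_gt (by omega)), ih hlt]

theorem charsInfix_singleton_iff (l : List Char) : ['/'] <:+: l ↔ '/' ∈ l := by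
  constructor
  · intro hinf; exact hinf.mem (by simp)
  · intro hm
    rcases List.mem_iff_append.mp hm with ⟨s, t, rfl⟩
    exact ⟨s, t, by simp⟩

theorem strIsIn_slash (c : String) : PySem.Str.isIn "/" c = true ↔ '/' ∈ c.toList := by
  rw [PySem.Str.isIn_iff_infix]
  exact charsInfix_singleton_iff _

theorem take_pvParR {l : List Char} : l.take (pvParR l).length = pvParR l :=
  (List.prefix_iff_eq_take.mp (pvParR_prefix l)).symm

theorem bParent_toList (c : String) : (bParent c).toList = pvParR c.toList := by
  unfold bParent
  by_cases h : PySem.Str.isIn "/" c = true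
  · have hm : '/' ∈ c.toList := (strIsIn_slash c).mp h
    have hr : PySem.Str.rfind c "/" = ((pvParR c.toList).length : Int) := by
      show PySem.Chars.rfind c.toList ['/'] = _
      unfold PySem.Chars.rfind
      exact rfindGo_eq hm _ (by simpa using (pvParR_prefix c.toList).length_le)
    rw [if_pos h, hr]
    show (PySem.Str.slice c none (some _)).toList = _
    simp [PySem.Str.slice, PySem.List.slice_to, take_pvParR]
  · rw [if_neg h]
    have : ¬ '/' ∈ c.toList := fun hm => h ((strIsIn_slash c).mpr hm)
    simp [pvParR_of_not_mem this]

def pvSplit : List Char → List (List Char)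
  | [] => [[]]
  | c :: t => if c = '/' then [] :: pvSplit t else (c :: (pvSplit t).headI) :: (pvSplit t).tail

theorem pvSplit_ne_nil (l : List Char) : pvSplit l ≠ [] := by
  cases l with
  | nil => simp [pvSplit]
  | cons c t => by_cases h : c = '/' <;> simp [pvSplit, h]

theorem pvSplit_cons_headI_tail (l : List Char) :
    (pvSplit l).headI :: (pvSplit l).tail = pvSplit l := by
  cases hs : pvSplit l with
  | nil => exact absurd hs (pvSplit_ne_nil l)
  | cons a r => simp

theorem splitOnGo_eq : ∀ (fuel : Nat) (l cur : List Char) (acc : List (List Char)), l.length ≤ fuel →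
    PySem.Chars.splitOn.go ['/'] fuel l cur acc
      = acc.reverse ++ (cur.reverse ++ (pvSplit l).headI) :: (pvSplit l).tail := by
  intro fuel
  induction fuel with
  | zero =>
    intro l cur acc hl
    have : l = [] := List.length_eq_zero_iff.mp (by omega)
    subst this
    rw [PySem.Chars.splitOn.go]
    simp [pvSplit]
  | succ fuel ih =>
    intro l cur acc hl
    cases l with
    | nil => rw [PySem.Chars.splitOn.go]; simp [pvSplit]; omega
    | cons c rest =>
      rw [PySem.Chars.splitOn.go]
      by_cases hc : c = '/'
      · subst hc
        have hpre : List.isPrefixOf ['/'] ('/' :: rest) = true := by simp [List.isPrefixOf]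
        rw [if_pos hpre]
        simp only [List.length_singleton, List.drop_succ_cons, List.drop_zero]
        rw [ih rest [] _ (by simpa using hl)]
        simp [pvSplit, pvSplit_cons_headI_tail]
      · have hpre : ¬ List.isPrefixOf ['/'] (c :: rest) = true := by
          simp [List.isPrefixOf, Ne.symm hc]
        rw [if_neg hpre]
        rw [ih rest (c :: cur) acc (by simpa using hl)]
        simp [pvSplit, hc]

theorem splitOn_eq (l : List Char) : PySem.Chars.splitOn l ['/'] = pvSplit l := by
  unfold PySem.Chars.splitOn
  rw [splitOnGo_eq (l.length + 1) l [] [] (by omega)]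
  simpa using pvSplit_cons_headI_tail l

theorem pvSplit_no_slash {l : List Char} (h : '/' ∉ l) : pvSplit l = [l] := by
  induction l with
  | nil => rfl
  | cons c t ih =>
    simp only [List.mem_cons] at h
    push_neg at h
    rw [pvSplit, if_neg (Ne.symm h.1), ih h.2]
    simp

theorem pvSplit_len_two {l : List Char} (h : '/' ∈ l) : 2 ≤ (pvSplit l).length := by
  induction l with
  | nil => simp at h
  | cons c t ih =>
    by_cases hc : c = '/'
    · rw [pvSplit, if_pos hc]
      have := pvSplit_ne_nil t
      have : 1 ≤ (pvSplit t).length := List.length_pos_of_ne_nil this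
      simp; omega
    · have ht : '/' ∈ t := by rcases List.mem_cons.mp h with h1 | h2; exact absurd h1.symm hc; exact h2
      rw [pvSplit, if_neg hc]
      have := ih ht
      simp only [List.length_cons, List.length_tail]
      omega

theorem flatMap_slash_ne_nil {L : List (List Char)} (h : L ≠ []) :
    L.flatMap (fun s => s ++ ['/']) ≠ [] := by
  cases L with
  | nil => simp at h
  | cons x r => simp

theorem flat_dropLast_eq_pvParR {l : List Char} (h : '/' ∈ l) :
    (((pvSplit l).dropLast).flatMap (fun s => s ++ ['/'])).dropLast = pvParR l := by
  induction l with
  | nil => simp at h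
  | cons c t ih =>
    by_cases ht : '/' ∈ t
    · have h2 := pvSplit_len_two ht
      obtain ⟨a, r, har⟩ : ∃ a r, pvSplit t = a :: r := by
        cases hs : pvSplit t with
        | nil => exact absurd hs (pvSplit_ne_nil t)
        | cons a r => exact ⟨a, r, rfl⟩
      have hr : r ≠ [] := by
        intro hn; rw [har, hn] at h2; simp at h2
      have hdl : (pvSplit t).dropLast = a :: r.dropLast := by
        rw [har, List.dropLast_cons_of_ne_nil hr]
      have hIH := ih ht
      rw [hdl] at hIH
      by_cases hc : c = '/'
      · subst hc
        rw [pvParR, if_pos ht, pvSplit, if_pos rfl]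
        rw [List.dropLast_cons_of_ne_nil (by rw [har]; exact fun hn => pvSplit_ne_nil t (by simp at hn))]
        rw [hdl]
        simp only [List.flatMap_cons, List.nil_append]
        have hX : (a ++ ['/'] ++ List.flatMap (fun s => s ++ ['/']) r.dropLast)
            = List.flatMap (fun s => s ++ ['/']) (a :: r.dropLast) := by simp
        rw [List.singleton_append,
          List.dropLast_cons_of_ne_nil (by rw [hX]; exact flatMap_slash_ne_nil (by simp)), hX, hIH]
      · rw [pvParR, if_pos ht, pvSplit, if_neg hc, har]
        simp only [List.headI_cons, List.tail_cons]
        rw [List.dropLast_cons_of_ne_nil hr, List.flatMap_cons]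
        have : ((c :: a) ++ ['/']) ++ (r.dropLast.flatMap (fun s => s ++ ['/']))
            = c :: ((a ++ ['/']) ++ r.dropLast.flatMap (fun s => s ++ ['/'])) := by simp
        rw [this, List.dropLast_cons_of_ne_nil (by simp), ← hIH]
        simp
    · have hc : c = '/' := by rcases List.mem_cons.mp h with h1 | h2; exact h1.symm; exact absurd h2 ht
      subst hc
      rw [pvParR, if_neg ht, pvSplit, if_pos rfl, pvSplit_no_slash ht]
      simp


theorem sApp_toList (a b : String) : (sApp a b).toList = a.toList ++ b.toList := by
  simp [sApp]

theorem strFold_toList (Q : List String) (s0 : String) :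
    (Q.foldl (fun a x => sApp (sApp a x) "/") s0).toList
      = s0.toList ++ Q.flatMap (fun q => q.toList ++ ['/']) := by
  induction Q generalizing s0 with
  | nil => simp
  | cons q Q ih =>
    simp only [List.foldl_cons, List.flatMap_cons, ih, sApp_toList]
    simp

theorem gSupNode_toList (c : String) : (gSupNode c).toList = pvParR c.toList := by
  unfold gSupNode
  by_cases h : PySem.Str.isIn "/" c = true
  · have hm : '/' ∈ c.toList := (strIsIn_slash c).mp h
    rw [h]
    simp only [Bool.not_true, Bool.false_eq_true, if_false]
    have hparts : (PySem.Str.split? c "/").getD [] = (pvSplit c.toList).map String.ofList := by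
      unfold PySem.Str.split? PySem.Chars.split?
      simp [splitOn_eq]
    rw [hparts]
    set P := pvSplit c.toList with hP
    have hPlen : 2 ≤ P.length := pvSplit_len_two hm
    have hbound : PySem.List.len (P.map String.ofList) - 1
        = PySem.List.len ((P.map String.ofList).dropLast) := by
      simp only [PySem.List.len_eq, List.length_map, List.length_dropLast]
      omega
    rw [hbound]
    have hcongr : (PySem.List.pyRange 0 (PySem.List.len ((P.map String.ofList).dropLast)) 1).foldl
        (fun newC p => sApp (sApp newC (PySem.List.pyGetD (P.map String.ofList) p "")) "/") ""
        = (PySem.List.pyRange 0 (PySem.List.len ((P.map String.ofList).dropLast)) 1).foldl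
        (fun newC p => sApp (sApp newC (PySem.List.pyGetD ((P.map String.ofList).dropLast) p "")) "/") "" := by
      apply PySem.List.foldl_congr_mem
      intro acc x hx
      rw [PySem.List.mem_pyRange_one] at hx
      have hlt : x < ((P.map String.ofList).dropLast).length := by
        have := hx.2; simp only [PySem.List.len_eq] at this; exact_mod_cast this
      have hlt2 : x < ((P.map String.ofList).length : Int) := by
        simp only [List.length_dropLast, List.length_map] at hlt ⊢
        omega
      rw [PySem.List.pyGetD_eq_getElem _ _ hx.1 hlt2,
          PySem.List.pyGetD_eq_getElem _ _ hx.1 (by exact_mod_cast hlt)]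
      rw [List.getElem_dropLast]
    rw [hcongr]
    simp only [PySem.List.len_eq]
    rw [PySem.List.foldl_pyRange_zero_pyGetD' ((P.map String.ofList).dropLast) ""
        (fun a x => sApp (sApp a x) "/") ""]
    rw [PySem.Str.slice_to_neg_one]
    rw [← List.map_dropLast, strFold_toList]
    have : (P.dropLast.map String.ofList).flatMap (fun q => q.toList ++ ['/'])
        = P.dropLast.flatMap (fun d => d ++ ['/']) := by
      rw [List.flatMap_map]; simp
    rw [this]
    simpa using flat_dropLast_eq_pvParR hm
  · simp only [Bool.not_eq_true] at h
    rw [h]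
    simp only [Bool.not_false, if_true]
    have : ¬ '/' ∈ c.toList := fun hm => by
      have h2 := (strIsIn_slash c).mpr hm
      cases h.symm.trans h2
    simp [pvParR_of_not_mem this]

theorem ofList_ne_empty {l : List Char} (h : ¬ String.ofList l = "") : l ≠ [] := by
  intro hn; apply h; rw [hn]

def pvRefTail (c : String) : List String :=
  let p := String.ofList (pvParR c.toList)
  if _h : p = "" then [] else p :: pvRefTail p
termination_by c.toList.length
decreasing_by
  rw [String.toList_ofList]
  exact pvParR_length_lt (ofList_ne_empty _h)

def pvRefChain (c : String) : List String := c :: pvRefTail c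

theorem gSupNode_eq (c : String) : gSupNode c = String.ofList (pvParR c.toList) := by
  rw [← gSupNode_toList]; exact String.ofList_toList.symm

theorem bParent_eq (c : String) : bParent c = String.ofList (pvParR c.toList) := by
  rw [← bParent_toList]; exact String.ofList_toList.symm

theorem parStr_toList_length_lt {c : String} (h : ¬ String.ofList (pvParR c.toList) = "") :
    (String.ofList (pvParR c.toList)).toList.length < c.toList.length := by
  rw [String.toList_ofList]
  exact pvParR_length_lt (ofList_ne_empty h)

theorem aSupLoop_eq_refTail : ∀ (fuel : Nat) (c : String), c.toList.length < fuel →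
    aSupLoop fuel c = pvRefTail c := by
  intro fuel
  induction fuel with
  | zero => intro c h; omega
  | succ fuel ih =>
    intro c h
    rw [aSupLoop, pvRefTail]
    simp only [gSupNode_eq]
    split_ifs with hp
    · rfl
    · rw [ih _ (by have := parStr_toList_length_lt hp; omega)]

theorem bAncTail_eq_refTail : ∀ (fuel : Nat) (c : String), c.toList.length < fuel →
    bAncTail fuel c = pvRefTail c := by
  intro fuel
  induction fuel with
  | zero => intro c h; omega
  | succ fuel ih =>
    intro c h
    rw [bAncTail, pvRefTail]
    simp only [bParent_eq]
    split_ifs with hp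
    · rfl
    · rw [ih _ (by have := parStr_toList_length_lt hp; omega)]

theorem bAncestors_eq (label : String) : bAncestors label = pvRefChain label := by
  rw [bAncestors, pvRefChain, bAncTail_eq_refTail _ _ (by omega)]

theorem mem_refChain_le {x s : String} (h : x ∈ pvRefChain s) :
    x.toList.length ≤ s.toList.length := by
  induction hn : s.toList.length using Nat.strong_induction_on generalizing s x with
  | _ n ih =>
    subst hn
    rw [pvRefChain] at h
    rcases List.mem_cons.mp h with rfl | h2
    · exact le_refl _
    · rw [pvRefTail] at h2
      split_ifs at h2 with hp
      · simp at h2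
      · have hlt := parStr_toList_length_lt hp
        have := ih _ hlt (x := x) (s := String.ofList (pvParR s.toList)) h2 rfl
        omega

theorem refChain_pairwise (s : String) :
    (pvRefChain s).Pairwise (fun a b => b.toList.length < a.toList.length) := by
  induction hn : s.toList.length using Nat.strong_induction_on generalizing s with
  | _ n ih =>
    subst hn
    rw [pvRefChain, List.pairwise_cons]
    constructor
    · intro y hy
      rw [pvRefTail] at hy
      split_ifs at hy with hp
      · simp at hy
      · have hlt := parStr_toList_length_lt hp
        have := mem_refChain_le (x := y) (s := String.ofList (pvParR s.toList)) hy
        omega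
    · rw [pvRefTail]
      split_ifs with hp
      · exact List.Pairwise.nil
      · exact ih _ (parStr_toList_length_lt hp) (s := String.ofList (pvParR s.toList)) rfl

theorem refChain_nodup (s : String) : (pvRefChain s).Nodup :=
  (refChain_pairwise s).imp (fun h => by intro he; subst he; omega)

theorem refChain_suffix {x s : String} (h : x ∈ pvRefChain s) :
    pvRefChain x <:+ pvRefChain s := by
  induction hn : s.toList.length using Nat.strong_induction_on generalizing s x with
  | _ n ih =>
    subst hn
    rw [pvRefChain] at h
    rcases List.mem_cons.mp h with rfl | h2
    · exact List.suffix_refl _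
    · rw [pvRefTail] at h2
      split_ifs at h2 with hp
      · simp at h2
      · have hlt := parStr_toList_length_lt hp
        have hsub := ih _ hlt (x := x) (s := String.ofList (pvParR s.toList)) (by rw [pvRefChain]; exact h2) rfl
        apply hsub.trans
        have : pvRefChain (String.ofList (pvParR s.toList)) = pvRefTail s := by
          rw [pvRefTail, dif_neg hp, pvRefChain]
        rw [this, pvRefChain]
        exact List.suffix_cons _ _

theorem foldSetdefault_get? : ∀ (l : List String) (s : Int) (d : PySem.Dict String Int) (x : String),
    ((PySem.List.enumerate l s).foldl (fun d jc => PySem.Dict.setdefault d jc.2 jc.1) d).get? x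
      = ((d.get? x).or ((PySem.List.index? l x).map (fun k => s + (k : Int)))) := by
  intro l
  induction l with
  | nil => intro s d x; simp [PySem.List.enumerate, PySem.List.index?]
  | cons c t ih =>
    intro s d x
    rw [PySem.List.enumerate_cons]
    simp only [List.foldl_cons]
    rw [ih]
    by_cases hx : x = c
    · subst hx
      by_cases hc : PySem.Dict.contains d x = true
      · have hsome : (d.get? x).isSome := by
          unfold PySem.Dict.contains at hc
          unfold PySem.Dict.get?
          rcases List.any_eq_true.mp hc with ⟨p, hp, hpx⟩
          rw [Option.isSome_map]
          exact List.find?_isSome.mpr ⟨p, hp, hpx⟩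
        rw [PySem.Dict.setdefault, if_pos hc]
        rcases Option.isSome_iff_exists.mp hsome with ⟨v, hv⟩
        simp [hv]
      · rw [PySem.Dict.setdefault, if_neg hc]
        have hfind : List.find? (fun p => p.1 == x) d.items = none := by
          rw [List.find?_eq_none]
          intro p hp hpe
          exact hc (List.any_eq_true.mpr ⟨p, hp, hpe⟩)
        have hget : PySem.Dict.get? d x = none := by
          unfold PySem.Dict.get?
          simp [hfind]
        have hget' : PySem.Dict.get? { items := d.items ++ [(x, s)] : PySem.Dict String Int } x = some s := by
          unfold PySem.Dict.get?
          rw [List.find?_append, hfind]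
          simp
        rw [hget', hget]
        rw [PySem.List.index?_cons_self]
        simp
    · have hxc : PySem.Dict.get? (PySem.Dict.setdefault d c s) x = PySem.Dict.get? d x := by
        rw [PySem.Dict.setdefault]
        split_ifs with hc
        · rfl
        · unfold PySem.Dict.get?
          rw [List.find?_append]
          have : List.find? (fun p => p.1 == x) [(c, s)] = none := by
            simp [Ne.symm hx]
          rw [this]
          simp
      rw [hxc]
      rw [PySem.List.index?_cons_of_ne _ (Ne.symm hx)]
      cases h : PySem.List.index? t x with
      | none => simp
      | some k =>
        simp
        have he : s + 1 + (k : Int) = s + ((k : Int) + 1) := by ring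
        rw [he]

theorem bIdx_getD (classes : List String) (x : String) :
    PySem.Dict.getD (bIdx classes) x 0 = (((PySem.List.index? classes x).getD 0 : Nat) : Int) := by
  rw [PySem.Dict.getD, bIdx, foldSetdefault_get?]
  have : PySem.Dict.get? (PySem.Dict.empty : PySem.Dict String Int) x = none := by
    unfold PySem.Dict.get? PySem.Dict.empty
    simp
  rw [this, Option.none_or]
  cases h : PySem.List.index? classes x with
  | none => simp
  | some k => simp

theorem chainBody_eq (c : String) :
    (if !(PySem.Str.isIn "/" c) then [] else aSupLoop (c.toList.length + 1) c) = pvRefTail c := by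
  by_cases h : PySem.Str.isIn "/" c = true
  · rw [h, if_neg (by simp)]
    exact aSupLoop_eq_refTail _ _ (Nat.lt_succ_self _)
  · simp only [Bool.not_eq_true] at h
    rw [h]
    have hm : ¬ '/' ∈ c.toList := fun hm => by cases h.symm.trans ((strIsIn_slash c).mpr hm)
    rw [pvRefTail]
    rw [dif_pos (by rw [pvParR_of_not_mem hm])]
    simp

theorem gSupNodesPort_eq (classes : List String) :
    gSupNodesPort classes = classes.map pvRefTail := by
  unfold gSupNodesPort
  have hbody : ∀ (sNodes : List (List String)) (i : Int),
      (let c := PySem.List.pyGetD classes i ""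
       if !(PySem.Str.isIn "/" c) then sNodes ++ [[]]
       else sNodes ++ [aSupLoop (c.toList.length + 1) c])
      = sNodes ++ [pvRefTail (PySem.List.pyGetD classes i "")] := by
    intro sNodes i
    show (if (!PySem.Str.isIn "/" (PySem.List.pyGetD classes i "")) = true then sNodes ++ [[]]
      else sNodes ++ [aSupLoop ((PySem.List.pyGetD classes i "").toList.length + 1) (PySem.List.pyGetD classes i "")]) = _
    rw [← chainBody_eq]
    split_ifs <;> rfl
  have : (PySem.List.pyRange 0 (PySem.List.len classes) 1).foldl
      (fun sNodes i =>
        let c := PySem.List.pyGetD classes i ""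
        if !(PySem.Str.isIn "/" c) then sNodes ++ [[]]
        else sNodes ++ [aSupLoop (c.toList.length + 1) c]) []
      = (PySem.List.pyRange 0 (PySem.List.len classes) 1).foldl
        (fun sNodes i => sNodes ++ [pvRefTail (PySem.List.pyGetD classes i "")]) [] := by
    apply PySem.List.foldl_congr_mem
    intro acc x _
    exact hbody acc x
  rw [this, PySem.List.foldl_append_singleton_eq_map (fun i => pvRefTail (PySem.List.pyGetD classes i ""))]
  simp only [PySem.List.len_eq, List.nil_append]
  conv_rhs => rw [← PySem.List.map_pyGetD_pyRange_zero' classes ""]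
  rw [List.map_map]
  rfl

theorem mutFold (cs : List String) : ∀ (m : Nat) (l : List (List String)), l.length = cs.length → m ≤ cs.length →
    (PySem.List.pyRange 0 (m : Int) 1).foldl
      (fun sn i => PySem.List.pySetD sn i
        (PySem.List.insert (PySem.List.pyGetD sn i []) 0 (PySem.List.pyGetD cs i ""))) l
    = (List.zipWith (fun c t => c :: t) (cs.take m) (l.take m)) ++ l.drop m := by
  intro m
  induction m with
  | zero =>
    intro l hl hm
    rw [show ((0 : Nat) : Int) = 0 from rfl, PySem.List.pyRange_one_eq_nil (by omega)]
    simp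
  | succ m ih =>
    intro l hl hm
    have hcast : ((m + 1 : Nat) : Int) = (m : Int) + 1 := by push_cast; ring
    rw [hcast, PySem.List.pyRange_one_succ_right (by positivity), List.foldl_append]
    rw [ih l hl (by omega)]
    set A := (List.zipWith (fun c t => c :: t) (cs.take m) (l.take m)) ++ l.drop m with hA
    have hzlen : (List.zipWith (fun c t => c :: t) (cs.take m) (l.take m)).length = m := by
      simp [List.length_zipWith]
      omega
    have hAlen : A.length = l.length := by
      rw [hA]
      simp only [List.length_append, hzlen, List.length_drop]
      omega
    have hmlt : m < l.length := by omega
    simp only [List.foldl_cons, List.foldl_nil]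
    have hgetA : PySem.List.pyGetD A (m : Int) [] = l[m] := by
      rw [PySem.List.pyGetD_natCast]
      rw [hA]
      rw [List.getD_eq_getElem _ _ (by rw [← hA, hAlen]; omega)]
      rw [List.getElem_append_right (by omega)]
      simp only [hzlen]
      rw [List.getElem_drop]
      congr 1
      omega
    have hgetc : PySem.List.pyGetD cs (m : Int) "" = cs[m]'(by omega) := by
      rw [PySem.List.pyGetD_natCast, List.getD_eq_getElem _ _ (by omega)]
    rw [hgetA, hgetc, PySem.List.insert_zero, PySem.List.pySetD_natCast]
    rw [hA, List.set_append]
    rw [if_neg (by omega)]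
    have hdrop : (l.drop m).set (m - (List.zipWith (fun c t => c :: t) (cs.take m) (l.take m)).length)
        (cs[m]'(by omega) :: l[m]) = (cs[m]'(by omega) :: l[m]) :: l.drop (m+1) := by
      rw [hzlen]
      simp only [Nat.sub_self]
      cases hd : l.drop m with
      | nil =>
        have : l.length ≤ m := List.drop_eq_nil_iff.mp hd
        omega
      | cons a r =>
        have hr : r = l.drop (m+1) := by
          have := congrArg List.tail hd
          rw [List.tail_drop] at this
          simpa using this.symm
        simp [hr]
    rw [hdrop]
    have htake : cs.take (m+1) = cs.take m ++ [cs[m]'(by omega)] := by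
      rw [List.take_add_one]
      simp [List.getElem?_eq_getElem (show m < cs.length by omega)]
    have htake2 : l.take (m+1) = l.take m ++ [l[m]] := by
      rw [List.take_add_one]
      simp [List.getElem?_eq_getElem hmlt]
    rw [htake, htake2, List.zipWith_append (by simp; omega)]
    simp

theorem zipWith_cons_map (cs : List String) :
    List.zipWith (fun c t => c :: t) cs (cs.map pvRefTail) = cs.map pvRefChain := by
  induction cs with
  | nil => rfl
  | cons c t ih => simp [ih, pvRefChain]

theorem gSupNodesIncl_eq (classes : List String) :
    gSupNodesInclPort classes = classes.map pvRefChain := by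
  unfold gSupNodesInclPort
  rw [gSupNodesPort_eq]
  have := mutFold classes classes.length (classes.map pvRefTail) (by simp) (le_refl _)
  simp only [PySem.List.len_eq]
  rw [this]
  have h1 : List.take classes.length (List.map pvRefTail classes) = List.map pvRefTail classes :=
    List.take_of_length_le (by simp)
  have h2 : List.drop classes.length (List.map pvRefTail classes) = [] :=
    List.drop_eq_nil_of_le (by simp)
  rw [List.take_length, h1, h2, List.append_nil, zipWith_cons_map]

theorem lookup_refChain {classes : List String} {t : String} (ht : t ∈ classes) :
    PySem.List.pyGetD (classes.map pvRefChain)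
      (((PySem.List.index? classes t).getD 0 : Nat) : Int) [] = pvRefChain t := by
  have hsome : (PySem.List.index? classes t).isSome := (PySem.List.index?_isSome_iff classes t).mpr ht
  rcases Option.isSome_iff_exists.mp hsome with ⟨k, hk⟩
  rcases PySem.List.getElem_of_index?_eq_some hk with ⟨hklt, hkt, _⟩
  rw [hk]
  simp only [Option.getD_some]
  rw [PySem.List.pyGetD_natCast, List.getD_eq_getElem _ _ (by simpa using hklt)]
  rw [List.getElem_map]
  rw [hkt]

theorem ofList_filter (q : String → Bool) (l : List String) :
    PySem.Set.ofList (l.filter q) = (PySem.Set.ofList l).filter q := by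
  induction l using List.reverseRecOn with
  | nil => rfl
  | append_singleton l x ih =>
    rw [List.filter_append, PySem.Set.ofList_append_singleton]
    by_cases hq : q x = true
    · simp only [List.filter_cons, hq, if_pos, List.filter_nil]
      rw [PySem.Set.ofList_append_singleton, ih]
      rw [PySem.Set.add_eq_ite, PySem.Set.add_eq_ite]
      by_cases hx : x ∈ PySem.Set.ofList l
      · rw [if_pos (List.mem_filter.mpr ⟨hx, hq⟩), if_pos hx]
      · rw [if_neg (fun hc => hx (List.mem_filter.mp hc).1), if_neg hx, List.filter_append]
        simp [hq]
    · simp only [List.filter_cons, hq]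
      simp only [Bool.false_eq_true, if_false, List.filter_nil, List.append_nil]
      rw [ih, PySem.Set.add_eq_ite]
      by_cases hx : x ∈ PySem.Set.ofList l
      · rw [if_pos hx]
      · rw [if_neg hx, List.filter_append]
        simp [hq]

theorem scanSwap (f : String → Int) (l : List String) :
    ∀ (a : Int × String) (b : String × Int), a.1 = b.2 → a.2 = b.1 →
    (l.foldl (fun st x => if f x > st.1 then (f x, x) else st) a).2
      = (l.foldl (fun st x => if f x > st.2 then (x, f x) else st) b).1 ∧
    (l.foldl (fun st x => if f x > st.1 then (f x, x) else st) a).1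
      = (l.foldl (fun st x => if f x > st.2 then (x, f x) else st) b).2 := by
  induction l with
  | nil => intro a b h1 h2; exact ⟨h2, h1⟩
  | cons x t ih =>
    intro a b h1 h2
    simp only [List.foldl_cons]
    by_cases hx : f x > a.1
    · rw [if_pos hx, if_pos (h1 ▸ hx)]
      exact ih _ _ rfl rfl
    · rw [if_neg hx, if_neg (h1 ▸ hx)]
      exact ih _ _ h1 h2

theorem lenSumInt (g : String → List String) (l : List String) :
    (l.map (fun c => PySem.List.len (g c))).sum = PySem.List.len (l.flatMap g) := by
  induction l with
  | nil => rfl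
  | cons x t ih =>
    simp only [PySem.List.len_eq] at ih ⊢
    simp only [List.map_cons, List.sum_cons, List.flatMap_cons, List.length_append]
    push_cast
    rw [ih]

theorem zipRangeFold {S : Type} (g : S → String → String → S) (X Y : List String) :
    ∀ (n : Nat), n ≤ X.length → n ≤ Y.length → ∀ (init : S),
    (PySem.List.pyRange 0 (n : Int) 1).foldl (fun st i => g st (PySem.List.pyGetD X i "") (PySem.List.pyGetD Y i "")) init
      = (List.zip (X.take n) (Y.take n)).foldl (fun st tp => g st tp.1 tp.2) init := by
  intro n
  induction n with
  | zero =>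
    intro _ _ init
    rw [show ((0 : Nat) : Int) = 0 from rfl, PySem.List.pyRange_one_eq_nil (by omega)]
    simp
  | succ n ih =>
    intro hX hY init
    have hcast : ((n + 1 : Nat) : Int) = (n : Int) + 1 := by push_cast; ring
    rw [hcast, PySem.List.pyRange_one_succ_right (by positivity), List.foldl_append]
    rw [ih (by omega) (by omega)]
    have htX : X.take (n+1) = X.take n ++ [X[n]'(by omega)] := by
      rw [List.take_add_one]
      simp [List.getElem?_eq_getElem (show n < X.length by omega)]
    have htY : Y.take (n+1) = Y.take n ++ [Y[n]'(by omega)] := by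
      rw [List.take_add_one]
      simp [List.getElem?_eq_getElem (show n < Y.length by omega)]
    rw [htX, htY, List.zip_append (by simp; omega), List.foldl_append]
    simp only [List.foldl_cons, List.foldl_nil]
    rw [PySem.List.pyGetD_natCast, PySem.List.pyGetD_natCast,
        List.getD_eq_getElem _ _ (by omega), List.getD_eq_getElem _ _ (by omega)]
    rfl

def pvAgree (a b : List String) (j : Nat) : Prop :=
  ∀ r < j, a[a.length - 1 - r]? = b[b.length - 1 - r]?

theorem pyGetD_back (a : List String) (k : Nat) (hk : k < a.length) :
    PySem.List.pyGetD a ((a.length : Int) - 1 - (k : Int)) "" = a[a.length - 1 - k]'(by omega) := by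
  have hidx : ((a.length : Int) - 1 - (k : Int)) = ((a.length - 1 - k : Nat) : Int) := by omega
  rw [hidx, PySem.List.pyGetD_natCast, List.getD_eq_getElem _ _ (by omega)]

theorem bKLoop_aux (a b : List String) :
    ∀ (fuel : Nat) (k : Nat), min a.length b.length - k < fuel → k ≤ min a.length b.length → pvAgree a b k →
    ∃ K : Nat, bKLoop fuel a b (k : Int) = (K : Int) ∧ k ≤ K ∧ K ≤ min a.length b.length ∧ pvAgree a b K ∧
      (K < min a.length b.length → a[a.length - 1 - K]? ≠ b[b.length - 1 - K]?) := by
  intro fuel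
  induction fuel with
  | zero => intro k hf _ _; omega
  | succ fuel ih =>
    intro k hf hk hAg
    rw [bKLoop]
    by_cases hcond : (k : Int) < min (PySem.List.len a) (PySem.List.len b) ∧
        PySem.List.pyGetD a (PySem.List.len a - 1 - (k : Int)) "" = PySem.List.pyGetD b (PySem.List.len b - 1 - (k : Int)) ""
    · have hklt : k < min a.length b.length := by
        have := hcond.1
        simp only [PySem.List.len_eq] at this
        omega
      have heq := hcond.2
      simp only [PySem.List.len_eq] at heq
      rw [pyGetD_back a k (by omega), pyGetD_back b k (by omega)] at heq
      have hAg' : pvAgree a b (k+1) := by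
        intro r hr
        by_cases hrk : r < k
        · exact hAg r hrk
        · have : r = k := by omega
          subst this
          rw [List.getElem?_eq_getElem (by omega), List.getElem?_eq_getElem (by omega)]
          exact congrArg some heq
      rw [if_pos hcond]
      have hcast : (k : Int) + 1 = ((k + 1 : Nat) : Int) := by push_cast; ring
      rw [hcast]
      rcases ih (k+1) (by omega) (by omega) hAg' with ⟨K, hK⟩
      exact ⟨K, hK.1, by omega, hK.2.2.1, hK.2.2.2.1, hK.2.2.2.2⟩
    · rw [if_neg hcond]
      refine ⟨k, rfl, le_refl _, hk, hAg, ?_⟩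
      intro hklt hcontra
      apply hcond
      constructor
      · simp only [PySem.List.len_eq]; omega
      · simp only [PySem.List.len_eq]
        rw [pyGetD_back a k (by omega), pyGetD_back b k (by omega)]
        rw [List.getElem?_eq_getElem (by omega), List.getElem?_eq_getElem (by omega)] at hcontra
        exact Option.some.inj hcontra

theorem bKLoop_spec (a b : List String) :
    ∃ K : Nat, bKLoop ((min (PySem.List.len a) (PySem.List.len b)).toNat + 1) a b 0 = (K : Int) ∧
      K ≤ min a.length b.length ∧ pvAgree a b K ∧
      (K < min a.length b.length → a[a.length - 1 - K]? ≠ b[b.length - 1 - K]?) := by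
  have hfuel : min a.length b.length - 0 < (min (PySem.List.len a) (PySem.List.len b)).toNat + 1 := by
    simp only [PySem.List.len_eq]
    omega
  rcases bKLoop_aux a b _ 0 hfuel (by omega) (by intro r hr; omega) with ⟨K, hK⟩
  exact ⟨K, hK.1, hK.2.2.1, hK.2.2.2.1, hK.2.2.2.2⟩

theorem dropEq_of_agree {a b : List String} {K : Nat} (hKa : K ≤ a.length) (hKb : K ≤ b.length)
    (hAg : pvAgree a b K) : a.drop (a.length - K) = b.drop (b.length - K) := by
  apply List.ext_getElem?
  intro i
  rw [List.getElem?_drop, List.getElem?_drop]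
  by_cases hi : i < K
  · have h1 : a.length - K + i = a.length - 1 - (K - 1 - i) := by omega
    have h2 : b.length - K + i = b.length - 1 - (K - 1 - i) := by omega
    rw [h1, h2]
    exact hAg (K - 1 - i) (by omega)
  · rw [List.getElem?_eq_none (by omega), List.getElem?_eq_none (by omega)]

theorem mem_drop_of_common {t p x : String} {K : Nat}
    (hmis : K < min (pvRefChain t).length (pvRefChain p).length →
      (pvRefChain t)[(pvRefChain t).length - 1 - K]? ≠ (pvRefChain p)[(pvRefChain p).length - 1 - K]?)
    (hx1 : x ∈ pvRefChain t) (hx2 : x ∈ pvRefChain p) :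
    x ∈ (pvRefChain t).drop ((pvRefChain t).length - K) := by
  rcases refChain_suffix hx1 with ⟨u, hu⟩
  rcases refChain_suffix hx2 with ⟨v, hv⟩
  have hrpos : 1 ≤ (pvRefChain x).length := by
    rw [pvRefChain]
    simp
  have hlena : (pvRefChain t).length = u.length + (pvRefChain x).length := by
    rw [← hu, List.length_append]
  have hlenb : (pvRefChain p).length = v.length + (pvRefChain x).length := by
    rw [← hv, List.length_append]
  have hrK : (pvRefChain x).length ≤ K := by
    by_contra hcon
    push_neg at hcon
    have hKm : K < min (pvRefChain t).length (pvRefChain p).length := by omega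
    apply hmis hKm
    have ha : (pvRefChain t)[(pvRefChain t).length - 1 - K]? = (pvRefChain x)[(pvRefChain x).length - 1 - K]? := by
      rw [← hu, List.getElem?_append_right (by simp only [List.length_append]; omega)]
      congr 1
      simp only [List.length_append]
      omega
    have hb : (pvRefChain p)[(pvRefChain p).length - 1 - K]? = (pvRefChain x)[(pvRefChain x).length - 1 - K]? := by
      rw [← hv, List.getElem?_append_right (by simp only [List.length_append]; omega)]
      congr 1
      simp only [List.length_append]
      omega
    rw [ha, hb]
  have hxS : (pvRefChain x)[0]? = some x := by
    rw [pvRefChain]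
    simp
  have hget : (pvRefChain t)[u.length]? = some x := by
    rw [← hu, List.getElem?_append_right (by omega)]
    simpa using hxS
  have hdropget : ((pvRefChain t).drop ((pvRefChain t).length - K))[u.length - ((pvRefChain t).length - K)]? = some x := by
    rw [List.getElem?_drop]
    rw [show (pvRefChain t).length - K + (u.length - ((pvRefChain t).length - K)) = u.length by omega]
    exact hget
  exact List.mem_of_getElem? hdropget

theorem inter_eq_drop {t p : String} {K : Nat}
    (hK : K ≤ min (pvRefChain t).length (pvRefChain p).length)
    (hAg : pvAgree (pvRefChain t) (pvRefChain p) K)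
    (hmis : K < min (pvRefChain t).length (pvRefChain p).length →
      (pvRefChain t)[(pvRefChain t).length - 1 - K]? ≠ (pvRefChain p)[(pvRefChain p).length - 1 - K]?) :
    PySem.Set.inter (PySem.Set.ofList (pvRefChain t))
        (PySem.Set.ofList ((pvRefChain p).drop ((pvRefChain p).length - (pvRefChain t).length)))
      = (pvRefChain t).drop ((pvRefChain t).length - K) := by
  set cT := pvRefChain t with hcT
  set cP := pvRefChain p with hcP
  set cPt := cP.drop (cP.length - cT.length) with hcPt
  have hsubPt : ∀ y, y ∈ cP.drop (cP.length - K) → y ∈ cPt := by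
    intro y hy
    have : cP.drop (cP.length - K) = cPt.drop ((cP.length - K) - (cP.length - cT.length)) := by
      rw [hcPt, List.drop_drop]
      congr 1
      omega
    rw [this] at hy
    exact List.mem_of_mem_drop hy
  have hdropEq : cT.drop (cT.length - K) = cP.drop (cP.length - K) :=
    dropEq_of_agree (by omega) (by omega) hAg
  unfold PySem.Set.inter
  rw [PySem.Set.ofList_eq_self_of_nodup cT (refChain_nodup t)]
  have hcontains : ∀ y, (PySem.Set.ofList cPt).contains y = true ↔ y ∈ cPt := by
    intro y
    rw [PySem.Set.contains_iff, PySem.Set.mem_ofList]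
  conv_lhs => rw [← List.take_append_drop (cT.length - K) cT]
  rw [List.filter_append]
  have hfilter2 : (cT.drop (cT.length - K)).filter (fun y => (PySem.Set.ofList cPt).contains y) = cT.drop (cT.length - K) := by
    apply List.filter_eq_self.mpr
    intro y hy
    rw [hcontains]
    apply hsubPt
    rw [← hdropEq]
    exact hy
  have hnodup : cT.Nodup := refChain_nodup t
  have hfilter1 : (cT.take (cT.length - K)).filter (fun y => (PySem.Set.ofList cPt).contains y) = [] := by
    rw [List.filter_eq_nil_iff]
    intro y hy hc
    rw [hcontains] at hc
    have hyP : y ∈ cP := List.mem_of_mem_drop hc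
    have hyT : y ∈ cT := List.mem_of_mem_take hy
    have hyDrop : y ∈ cT.drop (cT.length - K) := mem_drop_of_common hmis hyT hyP
    exact List.disjoint_take_drop hnodup (le_refl _) hy hyDrop
  rw [hfilter1, hfilter2, List.nil_append]


def stepA (classes : List String) (levels : List Int) (nNodes : List (List String))
    (st : Int × Int × Int × Int) (t p : String) : Int × Int × Int × Int :=
  let pathTrue := PySem.List.pyGetD (classes.map pvRefChain) (((PySem.List.index? classes t).getD 0 : Nat) : Int) []
  let pathPred0 := PySem.List.pyGetD (classes.map pvRefChain) (((PySem.List.index? classes p).getD 0 : Nat) : Int) []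
  let pathPred := if PySem.List.len pathTrue < PySem.List.len pathPred0
    then PySem.List.slice pathPred0 (some (PySem.List.len pathPred0 - PySem.List.len pathTrue)) none
    else pathPred0
  let pathCommon : PySem.Set String := PySem.Set.inter (PySem.Set.ofList pathTrue) (PySem.Set.ofList pathPred)
  let node := (getDeepestNodePort pathCommon classes levels).2
  let childrenDeepest : PySem.Set String := PySem.Set.diff (PySem.Set.ofList (getChildrenPort node classes)) (PySem.Set.ofList (pathTrue ++ pathPred))
  let neighbors := pathCommon.foldl (fun acc cl => acc ++ PySem.List.pyGetD nNodes (((PySem.List.index? classes cl).getD 0 : Nat) : Int) []) ([] : List String)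
  (st.1 + PySem.List.len pathCommon,
   st.2.1 + (PySem.List.len pathPred - PySem.List.len pathCommon),
   st.2.2.1 + (PySem.List.len neighbors + PySem.List.len childrenDeepest),
   st.2.2.2 + (PySem.List.len pathTrue - PySem.List.len pathCommon))

def stepB (classes : List String) (levels : List Int) (nNodes : List (List String))
    (st : Int × Int × Int × Int) (t p : String) : Int × Int × Int × Int :=
  let chainT := bAncestors t
  let chainP := bAncestors p
  let m := min (PySem.List.len chainT) (PySem.List.len chainP)
  let k := bKLoop (m.toNat + 1) chainT chainP 0
  let common := PySem.List.slice chainT (some (PySem.List.len chainT - k)) none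
  let dl := common.foldl (fun (st : String × Int) c =>
      let lv := PySem.List.pyGetD levels (PySem.Dict.getD (bIdx classes) c 0) 0
      if lv > st.2 then (c, lv) else st) ("", -1)
  let keep : PySem.Set String := PySem.Set.union (PySem.Set.ofList chainT)
    (PySem.Set.ofList (PySem.List.slice chainP (some (max (PySem.List.len chainP - PySem.List.len chainT) 0)) none))
  let children : PySem.Set String := PySem.Set.ofList (classes.filter (fun c => PySem.Str.startswith c (sApp dl.1 "/") && !(PySem.Set.contains keep c)))
  (st.1 + k,
   st.2.1 + (m - k),
   st.2.2.1 + (PySem.Set.len children + (common.map (fun c => PySem.List.len (PySem.List.pyGetD nNodes (PySem.Dict.getD (bIdx classes) c 0) []))).sum),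
   st.2.2.2 + (PySem.List.len chainT - k))

theorem childrenEq (classes : List String) (u1 u2 : List String) (node : String) :
    PySem.Set.diff (PySem.Set.ofList (classes.filter (fun c => PySem.Str.startswith c (sApp node "/"))))
        (PySem.Set.ofList (u1 ++ u2))
      = PySem.Set.ofList (classes.filter (fun c => PySem.Str.startswith c (sApp node "/")
          && !(PySem.Set.contains (PySem.Set.union (PySem.Set.ofList u1) (PySem.Set.ofList u2)) c))) := by
  rw [ofList_filter, ofList_filter]
  unfold PySem.Set.diff
  rw [List.filter_filter]
  apply List.filter_congr
  intro x _
  have hq : (PySem.Set.ofList (u1 ++ u2)).contains x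
      = PySem.Set.contains (PySem.Set.union (PySem.Set.ofList u1) (PySem.Set.ofList u2)) x := by
    rw [Bool.eq_iff_iff, PySem.Set.contains_iff, PySem.Set.contains_iff,
        PySem.Set.mem_ofList, PySem.Set.mem_union, PySem.Set.mem_ofList, PySem.Set.mem_ofList,
        List.mem_append]
  rw [hq, Bool.and_comm]

theorem sampleEq (classes : List String) (levels : List Int) (nNodes : List (List String))
    (t p : String) (ht : t ∈ classes) (hp : p ∈ classes) (st : Int × Int × Int × Int) :
    stepA classes levels nNodes st t p = stepB classes levels nNodes st t p := by
  unfold stepA stepB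
  simp only [lookup_refChain ht, lookup_refChain hp, bAncestors_eq, bIdx_getD]
  obtain ⟨K, hKrun, hKle, hAg, hmis⟩ := bKLoop_spec (pvRefChain t) (pvRefChain p)
  rw [hKrun]
  have hKt : K ≤ (pvRefChain t).length := le_trans hKle (min_le_left _ _)
  have hKp : K ≤ (pvRefChain p).length := le_trans hKle (min_le_right _ _)
  have htrunc : (if PySem.List.len (pvRefChain t) < PySem.List.len (pvRefChain p)
      then PySem.List.slice (pvRefChain p) (some (PySem.List.len (pvRefChain p) - PySem.List.len (pvRefChain t))) none
      else pvRefChain p)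
      = (pvRefChain p).drop ((pvRefChain p).length - (pvRefChain t).length) := by
    simp only [PySem.List.len_eq]
    split_ifs with h
    · rw [show (((pvRefChain p).length : Int) - ((pvRefChain t).length : Int))
          = (((pvRefChain p).length - (pvRefChain t).length : Nat) : Int) by omega]
      rw [PySem.List.slice_from_natCast]
    · rw [show (pvRefChain p).length - (pvRefChain t).length = 0 by omega, List.drop_zero]
  rw [htrunc]
  have hkeep : PySem.List.slice (pvRefChain p)
      (some (max (PySem.List.len (pvRefChain p) - PySem.List.len (pvRefChain t)) 0)) none
      = (pvRefChain p).drop ((pvRefChain p).length - (pvRefChain t).length) := by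
    simp only [PySem.List.len_eq]
    rw [PySem.List.slice_from _ (le_max_right _ _)]
    congr 1
    omega
  rw [hkeep]
  have hcommonB : PySem.List.slice (pvRefChain t) (some (PySem.List.len (pvRefChain t) - (K : Int))) none
      = (pvRefChain t).drop ((pvRefChain t).length - K) := by
    simp only [PySem.List.len_eq]
    rw [show (((pvRefChain t).length : Int) - (K : Int)) = (((pvRefChain t).length - K : Nat) : Int) by omega]
    rw [PySem.List.slice_from_natCast]
  rw [hcommonB]
  rw [inter_eq_drop hKle hAg hmis]
  simp only [getDeepestNodePort, getChildrenPort]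
  have hdeep := scanSwap (fun x => PySem.List.pyGetD levels (((PySem.List.index? classes x).getD 0 : Nat) : Int) 0)
    ((pvRefChain t).drop ((pvRefChain t).length - K)) (-1, "") ("", -1) rfl rfl
  simp only [hdeep.1]
  rw [PySem.List.foldl_append_if_eq_filter, List.nil_append]
  rw [childrenEq]
  rw [PySem.List.foldl_append_eq_flatMap
    (fun cl => PySem.List.pyGetD nNodes (((PySem.List.index? classes cl).getD 0 : Nat) : Int) []) _ []]
  rw [List.nil_append]
  rw [lenSumInt (fun cl => PySem.List.pyGetD nNodes (((PySem.List.index? classes cl).getD 0 : Nat) : Int) [])]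
  simp only [PySem.List.len_eq, PySem.Set.len, List.length_drop]
  simp only [Prod.mk.injEq]
  refine ⟨?_, ?_, ?_, ?_⟩
  · omega
  · omega
  · omega
  · omega

-- ===== VERDICT (by name: the statement is the Claim_ definition above) =====
theorem getConfusionMatrix_Perspective3_spec : Claim_equal_getConfusionMatrix_Perspective3 := by
  unfold Claim_equal_getConfusionMatrix_Perspective3
  intro Mtrue Mpred Lbltrue Lblpred classes levels nNodes _hDom hPre
  unfold Spec_getConfusionMatrix_Perspective3
  obtain ⟨hlt, hlp, hI⟩ := hPre
  unfold getConfusionMatrix_Perspective3 getConfusionMatrix_Perspective3_alt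
  simp only [gSupNodesIncl_eq]
  show (fun st : Int × Int × Int × Int => [st.1, st.2.1, st.2.2.1, st.2.2.2, PySem.List.len Mtrue])
      ((PySem.List.pyRange 0 (PySem.List.len Mtrue) 1).foldl
        (fun st i => stepA classes levels nNodes st (PySem.List.pyGetD Lbltrue i "") (PySem.List.pyGetD Lblpred i ""))
        ((0,0,0,0) : Int × Int × Int × Int))
    = (fun st : Int × Int × Int × Int => [st.1, st.2.1, st.2.2.1, st.2.2.2, PySem.List.len Mtrue])
      ((List.zip (PySem.List.slice Lbltrue none (some (PySem.List.len Mtrue)))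
          (PySem.List.slice Lblpred none (some (PySem.List.len Mtrue)))).foldl
        (fun st tp => stepB classes levels nNodes st tp.1 tp.2)
        ((0,0,0,0) : Int × Int × Int × Int))
  simp only [PySem.List.len_eq]
  rw [zipRangeFold (stepA classes levels nNodes) Lbltrue Lblpred Mtrue.length hlt hlp
    ((0,0,0,0) : Int × Int × Int × Int)]
  rw [PySem.List.slice_to_natCast, PySem.List.slice_to_natCast]
  have hfold : (List.zip (Lbltrue.take Mtrue.length) (Lblpred.take Mtrue.length)).foldl
      (fun st tp => stepA classes levels nNodes st tp.1 tp.2) ((0,0,0,0) : Int × Int × Int × Int)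
      = (List.zip (Lbltrue.take Mtrue.length) (Lblpred.take Mtrue.length)).foldl
      (fun st tp => stepB classes levels nNodes st tp.1 tp.2) ((0,0,0,0) : Int × Int × Int × Int) := by
    apply PySem.List.foldl_congr_mem
    intro acc tp htp
    rcases List.mem_iff_getElem.mp htp with ⟨i, hilt, hig⟩
    have hzl : (List.zip (Lbltrue.take Mtrue.length) (Lblpred.take Mtrue.length)).length
        = min (Lbltrue.take Mtrue.length).length (Lblpred.take Mtrue.length).length := List.length_zip
    have hi : i < Mtrue.length := by
      rw [hzl] at hilt
      simp only [List.length_take] at hilt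
      omega
    rw [List.getElem_zip] at hig
    have h1 : tp.1 = Lbltrue[i]'(by omega) := by
      rw [← hig]
      simp [List.getElem_take]
    have h2 : tp.2 = Lblpred[i]'(by omega) := by
      rw [← hig]
      simp [List.getElem_take]
    obtain ⟨ht, hp, -, -⟩ := hI i hi
    rw [List.getD_eq_getElem _ _ (by omega)] at ht
    rw [List.getD_eq_getElem _ _ (by omega)] at hp
    exact sampleEq classes levels nNodes tp.1 tp.2 (h1 ▸ ht) (h2 ▸ hp) acc
  rw [hfold]
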